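-- pv_equiv track=rewrite | github.com/gautambp/HackerRank | HourRank-30/diverse-strings.py | solve
-- ===== SOURCE A (Python) =====
-- import string
--
-- def solve(n, k):
--     # Write your code here
--     if n == 1 and n == k:
--         return string.ascii_lowercase[:k]
--     kk = k*(k+1)
--     if n == kk-1:
--         s = string.ascii_lowercase[k-1]
--         for i in range(k-1, 0, -1):
--             cnt = (k-i+1)
--             ss = string.ascii_lowercase[i-1]*cnt
--             s = ss + s + ss
--         return s
--     else:
--         return 'NONE'
-- ===== SOURCE B (Python) =====
-- import string
--
-- def solve(n, k):
--     if n == 1 and n == k: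
--         return string.ascii_lowercase[:k]
--     if n == k*(k+1) - 1:
--         left = ''.join(string.ascii_lowercase[i-1]*(k-i+1) for i in range(1, k))
--         center = string.ascii_lowercase[k-1]
--         return left + center + left[::-1]
--     return 'NONE'
-- ===== Notes on version B (the rewrite author's own statement) =====
-- stated objective: simpler
-- what changed: B replaces A's inside-out wrapping loop (s = ss + s + ss, counting down) with one forward pass that builds the left half by a join, then returns left + center + reversed(left).
-- outside the precondition, e.g. on solve(755, 27): A raises IndexError, B raises IndexError
import Mathlib
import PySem

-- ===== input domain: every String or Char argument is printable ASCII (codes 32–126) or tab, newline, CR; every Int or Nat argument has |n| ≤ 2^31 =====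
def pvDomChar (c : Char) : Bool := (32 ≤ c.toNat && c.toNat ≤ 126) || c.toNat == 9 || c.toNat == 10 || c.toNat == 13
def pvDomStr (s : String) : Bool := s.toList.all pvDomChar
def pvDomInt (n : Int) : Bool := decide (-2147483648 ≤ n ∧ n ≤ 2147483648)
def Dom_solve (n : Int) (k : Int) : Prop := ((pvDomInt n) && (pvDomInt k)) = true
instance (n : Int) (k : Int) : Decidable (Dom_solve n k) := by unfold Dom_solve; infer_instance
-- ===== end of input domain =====

-- B builds the palindrome as left + center + reversed(left) in one forward pass instead of
-- A's inside-out wrapping loop; same cost, simpler decomposition.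

-- string.ascii_lowercase
def pvLetters : List Char := "abcdefghijklmnopqrstuvwxyz".toList

-- ===== PORT A =====
def solve (n : Int) (k : Int) : String :=
  if n = 1 ∧ n = k then
    String.mk (PySem.List.slice pvLetters none (some k))
  else
    let kk := k * (k + 1)
    if n = kk - 1 then
      -- s = ascii_lowercase[k-1]  (Pre_ excludes the IndexError case; default never used there)
      let s0 : List Char := [(PySem.List.pyGet? pvLetters (k - 1)).getD 'a']
      let s := (PySem.List.pyRange (k - 1) 0 (-1)).foldl (fun s i =>
        let cnt := k - i + 1
        let ss := List.replicate cnt.toNat ((PySem.List.pyGet? pvLetters (i - 1)).getD 'a')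
        ss ++ s ++ ss) s0
      String.mk s
    else "NONE"

-- ===== PORT B =====
def solve_alt (n : Int) (k : Int) : String :=
  if n = 1 ∧ n = k then
    String.mk (PySem.List.slice pvLetters none (some k))
  else if n = k * (k + 1) - 1 then
    let left := ((PySem.List.pyRange 1 k 1).map (fun i =>
      List.replicate (k - i + 1).toNat ((PySem.List.pyGet? pvLetters (i - 1)).getD 'a'))).flatten
    let center := (PySem.List.pyGet? pvLetters (k - 1)).getD 'a'
    String.mk (left ++ [center] ++ left.reverse)
  else "NONE"

-- ===== PRECONDITION & SPEC =====
-- Pre_ excludes exactly the inputs on which A (and B alike) raises IndexError: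
-- the palindrome branch with ascii_lowercase[k-1] out of range (k > 26 or k < -25).
def Pre_solve (n : Int) (k : Int) : Prop := ¬ (n = k * (k + 1) - 1 ∧ (26 < k ∨ k < -25))
instance (n : Int) (k : Int) : Decidable (Pre_solve n k) := by unfold Pre_solve; infer_instance
def pvWitness_solve : Int × Int := (11, 3)

def Spec_solve (n : Int) (k : Int) (out : String) : Prop := out = solve_alt n k
instance (n : Int) (k : Int) (out : String) : Decidable (Spec_solve n k out) := by unfold Spec_solve; infer_instance

-- ===== CLAIM (what is proved, stated in full; the proofs are below) =====
def Claim_equal_solve : Prop := ∀ (n : Int) (k : Int), Dom_solve n k → Pre_solve n k → Spec_solve n k (solve n k)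

-- ===== LEMMAS AND PROOFS =====

-- A's wrapping loop, over any index list, unfolds to flatten-of-reverse ++ seed ++ flatten.
theorem pv_foldl_wrap (f : Int → List Char) (l : List Int) (s0 : List Char) :
    l.foldl (fun s i => f i ++ s ++ f i) s0
      = (l.reverse.map f).flatten ++ s0 ++ (l.map f).flatten := by
  induction l generalizing s0 with
  | nil => simp
  | cons a t ih =>
      simp only [List.foldl_cons, ih, List.reverse_cons, List.map_append, List.map_cons,
        List.flatten_append, List.flatten_cons, List.map_nil, List.flatten_nil]
      simp [List.append_assoc]

theorem pv_flatten_rev (f : Int → List Char) (hf : ∀ i, (f i).reverse = f i) (l : List Int) :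
    ((l.map f).flatten).reverse = (l.reverse.map f).flatten := by
  induction l with
  | nil => simp
  | cons a t ih => simp [List.reverse_append, ih, hf]

-- ===== VERDICT (by name: the statement is the Claim_ definition above) =====
theorem solve_spec : Claim_equal_solve := by
  intro n k _ _
  unfold Spec_solve solve solve_alt
  by_cases h1 : n = 1 ∧ n = k
  · obtain ⟨h1a, h1b⟩ := h1
    subst h1a; subst h1b
    simp
  · simp only [h1, if_false]
    by_cases h2 : n = k * (k + 1) - 1
    · simp only [h2, if_true]
      set f : Int → List Char := fun i =>
        List.replicate (k - i + 1).toNat ((PySem.List.pyGet? pvLetters (i - 1)).getD 'a') with hf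
      have hrev : PySem.List.pyRange (k - 1) 0 (-1) = (PySem.List.pyRange 1 k 1).reverse := by
        have := PySem.List.pyRange_neg_one_eq_reverse (k - 1) 0
        simpa using this
      rw [pv_foldl_wrap f, hrev]
      rw [pv_flatten_rev f (by intro i; simp [hf])]
      simp
    · simp [h2]
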